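-- pv_equiv track=rewrite | github.com/Rinzii/std-minver | cetest_prefs.py | _migrate_selected_group_keys
-- ===== SOURCE A (Python) =====
-- def _canonicalize_saved_family(fam: str) -> str:
--
--     f = (fam or "").strip()
--     if f == "icx":
--         return "intel-icx"
--     if f == "icc":
--         return "intel-icc"
--     return f
--
-- def _migrate_selected_group_keys(
--     selected: set[str],
--     families_to_platform_to_series_counts: dict[str, dict[str, dict[str, int]]],
-- ) -> set[str]:
--
--
--     out: set[str] = set()
--
--     def add_all_under(fam: str, platform: str | None = None) -> None:
--
--         by_platform = families_to_platform_to_series_counts.get(fam, {})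
--         if platform is None:
--             for p, by_series in by_platform.items():
--                 for s in by_series.keys():
--                     out.add(f"{fam}|{p}|{s}")
--             return
--         by_series = by_platform.get(platform, {})
--         for s in by_series.keys():
--             out.add(f"{fam}|{platform}|{s}")
--
--     for key in selected:
--         parts = [p.strip() for p in str(key).split("|")]
--         parts = [p for p in parts if p]
--         if not parts:
--             continue
--
--         if len(parts) == 1:
--             fam = _canonicalize_saved_family(parts[0])
--             add_all_under(fam)
--             continue
--
--         if len(parts) == 2:
--             fam = _canonicalize_saved_family(parts[0])
--             platform = parts[1]
--             add_all_under(fam, platform=platform)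
--             continue
--
--         fam = _canonicalize_saved_family(parts[0])
--         platform = parts[1]
--         series = "|".join(parts[2:])
--         if (
--             fam in families_to_platform_to_series_counts
--             and platform in families_to_platform_to_series_counts[fam]
--             and series in families_to_platform_to_series_counts[fam][platform]
--         ):
--             out.add(f"{fam}|{platform}|{series}")
--         else:
--
--             add_all_under(fam, platform=platform)
--
--     return out
-- ===== SOURCE B (Python) =====
-- def _canonicalize_saved_family(fam: str) -> str:
--     f = (fam or "").strip()
--     if f == "icx":
--         return "intel-icx"
--     if f == "icc":
--         return "intel-icc"
--     return f
--
--
-- def _migrate_selected_group_keys(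
--     selected: set[str],
--     families_to_platform_to_series_counts: dict[str, dict[str, dict[str, int]]],
-- ) -> set[str]:
--     # Flatten the nested mapping once into a relation of (family, platform, series) rows.
--     rows = [
--         (f, p, s)
--         for f, by_platform in families_to_platform_to_series_counts.items()
--         for p, by_series in by_platform.items()
--         for s in by_series
--     ]
--     existing = set(rows)
--
--     def pattern(key):
--         # Compile a selected key into a match pattern (None = wildcard), or None to skip.
--         parts = [q for q in (p.strip() for p in str(key).split("|")) if q]
--         if not parts:
--             return None
--         fam = _canonicalize_saved_family(parts[0])
--         if len(parts) == 1:
--             return (fam, None, None)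
--         platform = parts[1]
--         if len(parts) == 2:
--             return (fam, platform, None)
--         series = "|".join(parts[2:])
--         if (fam, platform, series) in existing:
--             return (fam, platform, series)
--         return (fam, platform, None)  # unknown exact key degrades to its (fam, platform) group
--
--     # Emit every row of the relation matched by some compiled pattern.
--     out: set[str] = set()
--     for key in selected:
--         pat = pattern(key)
--         if pat is None:
--             continue
--         fam, plat, ser = pat
--         for f, p, s in rows:
--             if f == fam and (plat is None or p == plat) and (ser is None or s == ser):
--                 out.add(f"{f}|{p}|{s}")
--     return out
-- ===== Notes on version B (the rewrite author's own statement) =====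
-- stated objective: alternative
-- what changed: B flattens the nested mapping once into a flat relation of (family, platform, series) rows, compiles each selected key into a wildcard match pattern (resolving the exact-or-fallback case with one membership test against the row set), and emits the output by scanning the relation for matching rows - replacing A's query-time nested-dict traversals through a set-mutating closure.
import Mathlib
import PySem

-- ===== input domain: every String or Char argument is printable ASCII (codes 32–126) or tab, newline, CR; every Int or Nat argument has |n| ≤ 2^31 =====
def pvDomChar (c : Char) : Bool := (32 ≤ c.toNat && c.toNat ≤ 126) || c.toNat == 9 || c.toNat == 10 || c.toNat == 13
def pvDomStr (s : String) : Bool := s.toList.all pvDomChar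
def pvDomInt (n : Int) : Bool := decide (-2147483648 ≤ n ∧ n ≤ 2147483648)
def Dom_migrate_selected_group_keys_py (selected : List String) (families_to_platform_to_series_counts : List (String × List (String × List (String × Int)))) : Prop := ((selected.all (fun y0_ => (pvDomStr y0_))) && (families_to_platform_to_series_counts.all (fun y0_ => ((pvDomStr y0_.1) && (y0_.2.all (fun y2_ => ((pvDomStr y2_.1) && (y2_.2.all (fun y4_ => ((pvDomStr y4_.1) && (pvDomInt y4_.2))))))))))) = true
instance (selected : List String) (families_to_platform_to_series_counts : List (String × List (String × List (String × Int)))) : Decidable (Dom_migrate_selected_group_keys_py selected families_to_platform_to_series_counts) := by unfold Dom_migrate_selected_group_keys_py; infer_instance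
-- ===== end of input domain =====

-- B flattens the nested mapping into a flat relation of (family, platform, series) rows, compiles
-- each selected key into a wildcard match pattern, and emits matching rows by scanning the relation,
-- instead of A's query-time nested-dict traversals through a set-mutating closure (objective: alternative).

-- ===== PORT A =====
-- _canonicalize_saved_family
def pvCanonA (fam : String) : String :=
  let f := PySem.Str.strip (if fam == "" then "" else fam)   -- (fam or "").strip()
  if f == "icx" then "intel-icx"
  else if f == "icc" then "intel-icc"
  else f

-- dict.get(k) on the association-list encoding of a Python dict (first match; keys unique under Pre_)
def pvGetA {V : Type} (d : List (String × V)) (k : String) : Option V :=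
  (d.find? (fun p => p.1 == k)).map (·.2)

-- the closure add_all_under(fam, platform); 'out' is threaded instead of mutated
def pvAddAllUnder (fams : List (String × List (String × List (String × Int))))
    (fam : String) (platform : Option String) (out : PySem.Set String) : PySem.Set String :=
  let by_platform := (pvGetA fams fam).getD []
  match platform with
  | none =>
      by_platform.foldl (fun out pp =>
        pp.2.foldl (fun out sp => PySem.Set.add out (PySem.Str.join "|" [fam, pp.1, sp.1])) out) out
  | some platform =>
      let by_series := (pvGetA by_platform platform).getD []
      by_series.foldl (fun out sp => PySem.Set.add out (PySem.Str.join "|" [fam, platform, sp.1])) out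

-- parts = [p for p in (q.strip() for q in str(key).split("|")) if p]
def pvPartsA (key : String) : List String :=
  (((PySem.Str.split? key "|").getD []).map PySem.Str.strip).filter (fun p => !(p == ""))

-- the body of A's loop after parts is computed (branch on len(parts))
def pvDispatchA (fams : List (String × List (String × List (String × Int))))
    (out : PySem.Set String) (parts : List String) : PySem.Set String :=
  match parts with
  | [] => out
  | [p0] => pvAddAllUnder fams (pvCanonA p0) none out
  | [p0, p1] => pvAddAllUnder fams (pvCanonA p0) (some p1) out
  | p0 :: p1 :: rest =>
      let fam := pvCanonA p0
      let platform := p1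
      let series := PySem.Str.join "|" rest
      let hit := match pvGetA fams fam with
        | none => false
        | some bp => match pvGetA bp platform with
          | none => false
          | some bs => (pvGetA bs series).isSome
      if hit then PySem.Set.add out (PySem.Str.join "|" [fam, platform, series])
      else pvAddAllUnder fams fam (some platform) out

-- one iteration of A's 'for key in selected'
def pvStepA (fams : List (String × List (String × List (String × Int))))
    (out : PySem.Set String) (key : String) : PySem.Set String :=
  pvDispatchA fams out (pvPartsA key)

def migrate_selected_group_keys_py (selected : List String) (families_to_platform_to_series_counts : List (String × List (String × List (String × Int)))) : List String :=
  selected.foldl (pvStepA families_to_platform_to_series_counts) PySem.Set.empty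

-- ===== PORT B =====
def pvCanonB (fam : String) : String :=
  let f := PySem.Str.strip (if fam == "" then "" else fam)
  if f == "icx" then "intel-icx"
  else if f == "icc" then "intel-icc"
  else f

-- the flattening comprehension: rows = [(f, p, s) for ...]
def pvRowsB (fams : List (String × List (String × List (String × Int)))) :
    List (String × String × String) :=
  fams.flatMap (fun fp => fp.2.flatMap (fun pp => pp.2.map (fun sp => (fp.1, pp.1, sp.1))))

def pvPartsB (key : String) : List String :=
  (((PySem.Str.split? key "|").getD []).map PySem.Str.strip).filter (fun p => !(p == ""))

-- the branch of pattern(key) on the cleaned parts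
def pvPatternParts (existing : PySem.Set (String × String × String)) (parts : List String) :
    Option (String × Option String × Option String) :=
  match parts with
  | [] => none
  | [p0] => some (pvCanonB p0, none, none)
  | [p0, p1] => some (pvCanonB p0, some p1, none)
  | p0 :: p1 :: rest =>
      let fam := pvCanonB p0
      let series := PySem.Str.join "|" rest
      if PySem.Set.contains existing (fam, p1, series) then some (fam, some p1, some series)
      else some (fam, some p1, none)

-- the closure pattern(key): a selected key compiled to (fam, platform?, series?), none = skip
def pvPatternB (existing : PySem.Set (String × String × String)) (key : String) :
    Option (String × Option String × Option String) :=
  pvPatternParts existing (pvPartsB key)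

-- the scan of the relation for rows matching one compiled pattern
def pvScanB (rows : List (String × String × String))
    (pat : String × Option String × Option String) (out : PySem.Set String) : PySem.Set String :=
  rows.foldl (fun out r =>
    if r.1 == pat.1
        && (match pat.2.1 with | none => true | some pl => r.2.1 == pl)
        && (match pat.2.2 with | none => true | some se => r.2.2 == se)
    then PySem.Set.add out (PySem.Str.join "|" [r.1, r.2.1, r.2.2]) else out) out

-- one iteration of B's output loop
def pvStepB (rows : List (String × String × String)) (existing : PySem.Set (String × String × String))
    (out : PySem.Set String) (key : String) : PySem.Set String :=
  match pvPatternB existing key with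
  | none => out
  | some pat => pvScanB rows pat out

def migrate_selected_group_keys_py_alt (selected : List String) (families_to_platform_to_series_counts : List (String × List (String × List (String × Int)))) : List String :=
  let rows := pvRowsB families_to_platform_to_series_counts
  let existing := PySem.Set.ofList rows
  selected.foldl (pvStepB rows existing) PySem.Set.empty

-- ===== PRECONDITION & SPEC =====
-- Pre_ excludes association lists with duplicate keys at some dict level: a Python dict has unique
-- keys, so such lists encode no actual Python input (first-match lookup vs. B's full relation scan
-- would both be arbitrary there).
def Pre_migrate_selected_group_keys_py (selected : List String) (families_to_platform_to_series_counts : List (String × List (String × List (String × Int)))) : Prop :=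
  (families_to_platform_to_series_counts.map (·.1)).Nodup ∧
  ∀ fp ∈ families_to_platform_to_series_counts,
    (fp.2.map (·.1)).Nodup ∧ ∀ pp ∈ fp.2, (pp.2.map (·.1)).Nodup
instance (selected : List String) (families_to_platform_to_series_counts : List (String × List (String × List (String × Int)))) : Decidable (Pre_migrate_selected_group_keys_py selected families_to_platform_to_series_counts) := by unfold Pre_migrate_selected_group_keys_py; infer_instance

def pvWitness_migrate_selected_group_keys_py : List String × (List (String × List (String × List (String × Int)))) :=
  (["icx", "f|p", "f|p|s", "g"], [("intel-icx", [("p", [("s", 1)])]), ("f", [("p", [("s", 2), ("t", 3)]), ("q", [("u", 4)])])])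

def Spec_migrate_selected_group_keys_py (selected : List String) (families_to_platform_to_series_counts : List (String × List (String × List (String × Int)))) (out : List String) : Prop := out = migrate_selected_group_keys_py_alt selected families_to_platform_to_series_counts
instance (selected : List String) (families_to_platform_to_series_counts : List (String × List (String × List (String × Int)))) (out : List String) : Decidable (Spec_migrate_selected_group_keys_py selected families_to_platform_to_series_counts out) := by unfold Spec_migrate_selected_group_keys_py; infer_instance

-- ===== CLAIM =====
def Claim_equal_migrate_selected_group_keys_py : Prop := ∀ (selected : List String) (families_to_platform_to_series_counts : List (String × List (String × List (String × Int)))), Dom_migrate_selected_group_keys_py selected families_to_platform_to_series_counts → Pre_migrate_selected_group_keys_py selected families_to_platform_to_series_counts → Spec_migrate_selected_group_keys_py selected families_to_platform_to_series_counts (migrate_selected_group_keys_py selected families_to_platform_to_series_counts)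

-- ===== LEMMAS AND PROOFS =====

def pvKey3 (fam p s : String) : String := PySem.Str.join "|" [fam, p, s]

-- the list A's add_all_under(fam) inserts, and the one add_all_under(fam, platform) inserts
def pvFamList (fams : List (String × List (String × List (String × Int)))) (fam : String) : List String :=
  match pvGetA fams fam with
  | none => []
  | some bp => bp.flatMap (fun pp => pp.2.map (fun sp => pvKey3 fam pp.1 sp.1))

def pvPairList (fams : List (String × List (String × List (String × Int)))) (fam p : String) : List String :=
  match pvGetA fams fam with
  | none => []
  | some bp =>
    match pvGetA bp p with
    | none => []
    | some bs => bs.map (fun sp => pvKey3 fam p sp.1)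

theorem pv_nested_add (fam : String) (bp : List (String × List (String × Int))) (out : PySem.Set String) :
    bp.foldl (fun out pp =>
        pp.2.foldl (fun out sp => PySem.Set.add out (PySem.Str.join "|" [fam, pp.1, sp.1])) out) out
      = PySem.Set.update out (bp.flatMap (fun pp => pp.2.map (fun sp => pvKey3 fam pp.1 sp.1))) := by
  induction bp generalizing out with
  | nil => simp [PySem.Set.update]
  | cons h t ih =>
    simp only [List.foldl_cons, List.flatMap_cons]
    rw [ih, ← PySem.Set.update_map_eq_foldl_add]
    simp [PySem.Set.update, List.foldl_append, pvKey3]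

theorem pv_addAll_none (fams : List (String × List (String × List (String × Int)))) (fam : String) (out : PySem.Set String) :
    pvAddAllUnder fams fam none out = PySem.Set.update out (pvFamList fams fam) := by
  unfold pvAddAllUnder pvFamList
  cases hg : pvGetA fams fam with
  | none => simp [PySem.Set.update]
  | some bp => simpa using pv_nested_add fam bp out

theorem pv_addAll_some (fams : List (String × List (String × List (String × Int)))) (fam p : String) (out : PySem.Set String) :
    pvAddAllUnder fams fam (some p) out = PySem.Set.update out (pvPairList fams fam p) := by
  unfold pvAddAllUnder pvPairList
  cases hg : pvGetA fams fam with
  | none => simp [pvGetA, PySem.Set.update]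
  | some bp =>
    simp only [Option.getD_some]
    cases hg2 : pvGetA bp p with
    | none => simp [PySem.Set.update]
    | some bs =>
      simp only [Option.getD_some]
      rw [← PySem.Set.update_map_eq_foldl_add]
      simp [pvKey3]

-- B's guarded scan = Set.update by the filtered relation
theorem pv_scan_eq_update (rows : List (String × String × String))
    (q : String × String × String → Bool) (out : PySem.Set String) :
    rows.foldl (fun out r => if q r then PySem.Set.add out (PySem.Str.join "|" [r.1, r.2.1, r.2.2]) else out) out
      = PySem.Set.update out ((rows.filter q).map (fun r => pvKey3 r.1 r.2.1 r.2.2)) := by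
  induction rows generalizing out with
  | nil => simp [PySem.Set.update]
  | cons h t ih =>
    simp only [List.foldl_cons, List.filter_cons]
    by_cases hq : q h = true
    · simp only [hq, if_true]
      rw [ih]
      simp [PySem.Set.update, pvKey3]
    · simp only [hq, if_false, Bool.false_eq_true]
      rw [ih]

-- first components of rows of pvRowsB
theorem pv_mem_rows_fst (fams : List (String × List (String × List (String × Int))))
    (r : String × String × String) (h : r ∈ pvRowsB fams) : r.1 ∈ fams.map (·.1) := by
  simp only [pvRowsB, List.mem_flatMap, List.mem_map] at h
  obtain ⟨fp, hfp, pp, hpp, sp, hsp, rfl⟩ := h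
  exact List.mem_map.mpr ⟨fp, hfp, rfl⟩

-- filtering the relation by family = the family's block
theorem pv_filter_fam (fams : List (String × List (String × List (String × Int))))
    (h1 : (fams.map (·.1)).Nodup) (fam : String) :
    (pvRowsB fams).filter (fun r => r.1 == fam)
      = ((pvGetA fams fam).getD []).flatMap (fun pp => pp.2.map (fun sp => (fam, pp.1, sp.1))) := by
  induction fams with
  | nil => rfl
  | cons h t ih =>
    have hsplit : pvRowsB (h :: t)
        = h.2.flatMap (fun pp => pp.2.map (fun sp => (h.1, pp.1, sp.1))) ++ pvRowsB t := by
      simp [pvRowsB]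
    rw [hsplit, List.filter_append]
    have hcons : h.1 ∉ t.map (·.1) ∧ (t.map (·.1)).Nodup := by
      rw [List.map_cons, List.nodup_cons] at h1; exact h1
    have h1' : (t.map (·.1)).Nodup := hcons.2
    by_cases hh : h.1 = fam
    · have hblock : (h.2.flatMap (fun pp => pp.2.map (fun sp => (h.1, pp.1, sp.1)))).filter (fun r => r.1 == fam)
          = h.2.flatMap (fun pp => pp.2.map (fun sp => (fam, pp.1, sp.1))) := by
        subst hh
        rw [List.filter_eq_self.mpr]
        intro r hr
        simp only [List.mem_flatMap, List.mem_map] at hr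
        obtain ⟨pp, _, sp, _, rfl⟩ := hr
        simp
      have hrest : (pvRowsB t).filter (fun r => r.1 == fam) = [] := by
        rw [List.filter_eq_nil_iff]
        intro r hr
        have := pv_mem_rows_fst t r hr
        have hnot : fam ∉ t.map (·.1) := hh ▸ hcons.1
        simp only [beq_iff_eq]
        intro hc; exact hnot (hc ▸ this)
      rw [hblock, hrest, List.append_nil]
      simp [pvGetA, hh]
    · have hblock : (h.2.flatMap (fun pp => pp.2.map (fun sp => (h.1, pp.1, sp.1)))).filter (fun r => r.1 == fam) = [] := by
        rw [List.filter_eq_nil_iff]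
        intro r hr
        simp only [List.mem_flatMap, List.mem_map] at hr
        obtain ⟨pp, _, sp, _, rfl⟩ := hr
        simpa using hh
      rw [hblock, List.nil_append, ih h1']
      have : pvGetA (h :: t) fam = pvGetA t fam := by
        simp [pvGetA, hh]
      rw [this]

-- refining the family block by platform = the platform's block
theorem pv_filter_plat (fam p : String) (bp : List (String × List (String × Int)))
    (h2 : (bp.map (·.1)).Nodup) :
    (bp.flatMap (fun pp => pp.2.map (fun sp => (fam, pp.1, sp.1)))).filter (fun r => r.2.1 == p)
      = ((pvGetA bp p).getD []).map (fun sp => (fam, p, sp.1)) := by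
  induction bp with
  | nil => rfl
  | cons h t ih =>
    simp only [List.flatMap_cons, List.filter_append]
    have hcons : h.1 ∉ t.map (·.1) ∧ (t.map (·.1)).Nodup := by
      rw [List.map_cons, List.nodup_cons] at h2; exact h2
    have h2' : (t.map (·.1)).Nodup := hcons.2
    by_cases hh : h.1 = p
    · have hblock : (h.2.map (fun sp => (fam, h.1, sp.1))).filter (fun r => r.2.1 == p)
          = h.2.map (fun sp => (fam, p, sp.1)) := by
        subst hh
        rw [List.filter_eq_self.mpr]
        · intro r hr
          simp only [List.mem_map] at hr
          obtain ⟨sp, _, rfl⟩ := hr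
          simp
      have hrest : (t.flatMap (fun pp => pp.2.map (fun sp => (fam, pp.1, sp.1)))).filter (fun r => r.2.1 == p) = [] := by
        rw [List.filter_eq_nil_iff]
        intro r hr
        simp only [List.mem_flatMap, List.mem_map] at hr
        obtain ⟨pp, hpp, sp, _, rfl⟩ := hr
        have hnot : p ∉ t.map (·.1) := hh ▸ hcons.1
        simp only [beq_iff_eq]
        intro hc
        exact hnot (hc ▸ List.mem_map.mpr ⟨pp, hpp, rfl⟩)
      rw [hblock, hrest, List.append_nil]
      simp [pvGetA, hh]
    · have hblock : (h.2.map (fun sp => (fam, h.1, sp.1))).filter (fun r => r.2.1 == p) = [] := by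
        rw [List.filter_eq_nil_iff]
        intro r hr
        simp only [List.mem_map] at hr
        obtain ⟨sp, _, rfl⟩ := hr
        simpa using hh
      rw [hblock, List.nil_append, ih h2']
      have : pvGetA (h :: t) p = pvGetA t p := by
        simp [pvGetA, hh]
      rw [this]

-- refining the platform block by series under series-key uniqueness: at most the one row
theorem pv_filter_ser (fam p s : String) (bs : List (String × Int))
    (h3 : (bs.map (·.1)).Nodup) :
    (bs.map (fun sp => (fam, p, sp.1))).filter (fun r => r.2.2 == s)
      = if (pvGetA bs s).isSome then [(fam, p, s)] else [] := by
  induction bs with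
  | nil => rfl
  | cons h t ih =>
    simp only [List.map_cons, List.filter_cons]
    have hcons : h.1 ∉ t.map (·.1) ∧ (t.map (·.1)).Nodup := by
      rw [List.map_cons, List.nodup_cons] at h3; exact h3
    have h3' : (t.map (·.1)).Nodup := hcons.2
    by_cases hh : h.1 = s
    · have hrest : (t.map (fun sp => (fam, p, sp.1))).filter (fun r => r.2.2 == s) = [] := by
        rw [List.filter_eq_nil_iff]
        intro r hr
        simp only [List.mem_map] at hr
        obtain ⟨sp, hsp, rfl⟩ := hr
        have hnot : s ∉ t.map (·.1) := hh ▸ hcons.1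
        simp only [beq_iff_eq]
        intro hc
        exact hnot (hc ▸ List.mem_map.mpr ⟨sp, hsp, rfl⟩)
      simp [hh, hrest, pvGetA]
    · have : pvGetA (h :: t) s = pvGetA t s := by
        simp [pvGetA, hh]
      simp only [show ((fam, p, h.1).2.2 == s) = false by simpa using hh, this, ih h3']
      simp

-- the membership test against the flattened row set = A's nested-get hit test
theorem pv_hit_eq (fams : List (String × List (String × List (String × Int))))
    (h1 : (fams.map (·.1)).Nodup)
    (h2 : ∀ fp ∈ fams, (fp.2.map (·.1)).Nodup) (fam p s : String) :
    PySem.Set.contains (PySem.Set.ofList (pvRowsB fams)) (fam, p, s)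
      = (match pvGetA fams fam with
         | none => false
         | some bp => match pvGetA bp p with
           | none => false
           | some bs => (pvGetA bs s).isSome) := by
  have hmem : PySem.Set.contains (PySem.Set.ofList (pvRowsB fams)) (fam, p, s)
      = decide ((fam, p, s) ∈ pvRowsB fams) := by
    by_cases hm : (fam, p, s) ∈ pvRowsB fams
    · simp [hm]
    · simp only [hm, decide_false]
      apply Bool.eq_false_iff.mpr
      intro hc
      exact hm ((PySem.Set.mem_ofList _ _).mp ((PySem.Set.contains_iff _ _).mp hc))
  rw [hmem]
  have hmem2 : (fam, p, s) ∈ pvRowsB fams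
      ↔ ∃ fp ∈ fams, fp.1 = fam ∧ ∃ pp ∈ fp.2, pp.1 = p ∧ ∃ sp ∈ pp.2, sp.1 = s := by
    simp only [pvRowsB, List.mem_flatMap, List.mem_map]
    constructor
    · rintro ⟨fp, hfp, pp, hpp, sp, hsp, heq⟩
      exact ⟨fp, hfp, congrArg (·.1) heq, pp, hpp, congrArg (·.2.1) heq, sp, hsp, congrArg (·.2.2) heq⟩
    · rintro ⟨fp, hfp, rfl, pp, hpp, rfl, sp, hsp, rfl⟩
      exact ⟨fp, hfp, pp, hpp, sp, hsp, rfl⟩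
  unfold pvGetA
  cases hf : fams.find? (fun a => a.1 == fam) with
  | none =>
    simp only [Option.map_none]
    rw [List.find?_eq_none] at hf
    apply decide_eq_false
    rw [hmem2]
    rintro ⟨fp, hfp, hfam, -⟩
    exact absurd (by simpa using hfam) (by simpa using hf fp hfp)
  | some fp =>
    have hfam : fp.1 = fam := by have := List.find?_some hf; simpa using this
    have hfpmem := List.mem_of_find?_eq_some hf
    simp only [Option.map_some]
    cases hfp2 : fp.2.find? (fun a => a.1 == p) with
    | none =>
      simp only [Option.map_none]
      rw [List.find?_eq_none] at hfp2
      apply decide_eq_false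
      rw [hmem2]
      rintro ⟨fp', hfp', hfam', pp', hpp', hp', -⟩
      have : fp' = fp := List.inj_on_of_nodup_map h1 hfp' hfpmem (by rw [hfam', hfam])
      subst this
      exact absurd (by simpa using hp') (by simpa using hfp2 pp' hpp')
    | some pp =>
      have hp : pp.1 = p := by have := List.find?_some hfp2; simpa using this
      have hppmem := List.mem_of_find?_eq_some hfp2
      simp only [Option.map_some]
      cases hsp : pp.2.find? (fun a => a.1 == s) with
      | none =>
        simp only [Option.map_none, Option.isSome_none]
        rw [List.find?_eq_none] at hsp
        apply decide_eq_false
        rw [hmem2]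
        rintro ⟨fp', hfp', hfam', pp', hpp', hp', sp', hsp', hs'⟩
        have hfpe : fp' = fp := List.inj_on_of_nodup_map h1 hfp' hfpmem (by rw [hfam', hfam])
        have hpp2 : pp' ∈ fp.2 := hfpe ▸ hpp'
        have hppe : pp' = pp := List.inj_on_of_nodup_map (h2 fp hfpmem) hpp2 hppmem (by rw [hp', hp])
        have hsp2 : sp' ∈ pp.2 := hppe ▸ hsp'
        exact absurd (by simpa using hs') (by simpa using hsp sp' hsp2)
      | some sp =>
        have hs : sp.1 = s := by have := List.find?_some hsp; simpa using this
        simp only [Option.map_some, Option.isSome_some]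
        apply decide_eq_true
        rw [hmem2]
        exact ⟨fp, hfpmem, hfam, pp, hppmem, hp, sp, List.mem_of_find?_eq_some hsp, hs⟩

-- the family scan emits pvFamList
theorem pv_scan_fam (fams : List (String × List (String × List (String × Int))))
    (h1 : (fams.map (·.1)).Nodup) (fam : String) :
    ((pvRowsB fams).filter (fun r => r.1 == fam)).map (fun r => pvKey3 r.1 r.2.1 r.2.2)
      = pvFamList fams fam := by
  rw [pv_filter_fam fams h1 fam]
  unfold pvFamList
  cases hg : pvGetA fams fam with
  | none => rfl
  | some bp => simp [List.map_flatMap, List.map_map, Function.comp_def]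

-- the (family, platform) scan emits pvPairList
theorem pv_scan_pair (fams : List (String × List (String × List (String × Int))))
    (h1 : (fams.map (·.1)).Nodup)
    (h2 : ∀ fp ∈ fams, (fp.2.map (·.1)).Nodup) (fam p : String) :
    ((pvRowsB fams).filter (fun r => r.1 == fam && r.2.1 == p)).map (fun r => pvKey3 r.1 r.2.1 r.2.2)
      = pvPairList fams fam p := by
  have hff : (pvRowsB fams).filter (fun r => r.1 == fam && r.2.1 == p)
      = ((pvRowsB fams).filter (fun r => r.1 == fam)).filter (fun r => r.2.1 == p) := by
    rw [List.filter_filter]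
    congr 1
    funext r
    exact Bool.and_comm _ _
  rw [hff, pv_filter_fam fams h1 fam]
  unfold pvPairList
  cases hg : pvGetA fams fam with
  | none => rfl
  | some bp =>
    have hbp : bp ∈ fams.map (·.2) := by
      unfold pvGetA at hg
      cases hf : fams.find? (fun a => a.1 == fam) with
      | none => rw [hf] at hg; simp at hg
      | some fp =>
        rw [hf] at hg
        have : fp.2 = bp := by simpa using hg
        exact this ▸ List.mem_map.mpr ⟨fp, List.mem_of_find?_eq_some hf, rfl⟩
    have h2' : (bp.map (·.1)).Nodup := by
      obtain ⟨fp, hfp, rfl⟩ := List.mem_map.mp hbp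
      exact h2 fp hfp
    simp only [Option.getD_some]
    rw [pv_filter_plat fam p bp h2']
    cases hg2 : pvGetA bp p with
    | none => rfl
    | some bs => simp [List.map_map, Function.comp_def]

-- a found family block is one of the data's blocks (to transport the nodup hypotheses)
theorem pv_getA_mem {V : Type} (fams : List (String × V))
    (fam : String) (bp : V) (hg : pvGetA fams fam = some bp) :
    ∃ fp ∈ fams, fp.1 = fam ∧ fp.2 = bp := by
  unfold pvGetA at hg
  cases hf : fams.find? (fun a => a.1 == fam) with
  | none => rw [hf] at hg; simp at hg
  | some fp =>
    rw [hf] at hg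
    refine ⟨fp, List.mem_of_find?_eq_some hf, ?_, by simpa using hg⟩
    have := List.find?_some hf; simpa using this

-- the loop body of A on given parts = B's pattern compilation followed by the relation scan
set_option maxHeartbeats 1000000 in
theorem pv_dispatch_eq (fams : List (String × List (String × List (String × Int))))
    (h : Pre_migrate_selected_group_keys_py [] fams) (out : PySem.Set String) (parts : List String) :
    pvDispatchA fams out parts
      = match pvPatternParts (PySem.Set.ofList (pvRowsB fams)) parts with
        | none => out
        | some pat => pvScanB (pvRowsB fams) pat out := by
  obtain ⟨h1, h2⟩ := h
  have h2a : ∀ fp ∈ fams, (fp.2.map (·.1)).Nodup := fun fp hfp => (h2 fp hfp).1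
  unfold pvDispatchA pvPatternParts pvScanB
  cases parts with
  | nil => rfl
  | cons p0 rest0 =>
    cases rest0 with
    | nil =>
      dsimp only
      simp only [Bool.and_true]
      rw [pv_addAll_none,
          pv_scan_eq_update (pvRowsB fams) (fun r => r.1 == pvCanonB p0) out,
          show pvCanonB = pvCanonA from rfl, pv_scan_fam fams h1]
    | cons p1 rest1 =>
      cases rest1 with
      | nil =>
        dsimp only
        simp only [Bool.and_true]
        rw [pv_addAll_some,
            pv_scan_eq_update (pvRowsB fams) (fun r => r.1 == pvCanonB p0 && r.2.1 == p1) out,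
            show pvCanonB = pvCanonA from rfl, pv_scan_pair fams h1 h2a]
      | cons p2 rest2 =>
        dsimp only
        rw [show pvCanonB = pvCanonA from rfl,
            pv_hit_eq fams h1 h2a (pvCanonA p0) p1 (PySem.Str.join "|" (p2 :: rest2))]
        by_cases hc : (match pvGetA fams (pvCanonA p0) with
            | none => false
            | some bp => match pvGetA bp p1 with
              | none => false
              | some bs => (pvGetA bs (PySem.Str.join "|" (p2 :: rest2))).isSome) = true
        · rw [if_pos hc, if_pos hc]
          dsimp only
          rw [pv_scan_eq_update (pvRowsB fams)
              (fun r => r.1 == pvCanonA p0 && r.2.1 == p1 && r.2.2 == PySem.Str.join "|" (p2 :: rest2)) out]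
          obtain ⟨bp, hbp, bs, hbs, hsome⟩ : ∃ bp, pvGetA fams (pvCanonA p0) = some bp ∧
              ∃ bs, pvGetA bp p1 = some bs ∧
                (pvGetA bs (PySem.Str.join "|" (p2 :: rest2))).isSome = true := by
            cases hg : pvGetA fams (pvCanonA p0) with
            | none => rw [hg] at hc; simp at hc
            | some bp =>
              rw [hg] at hc
              dsimp only at hc
              cases hg2 : pvGetA bp p1 with
              | none => rw [hg2] at hc; simp at hc
              | some bs =>
                rw [hg2] at hc
                dsimp only at hc
                exact ⟨bp, rfl, bs, hg2, hc⟩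
          have hfilter2 : (pvRowsB fams).filter (fun r => r.1 == pvCanonA p0 && r.2.1 == p1)
              = bs.map (fun sp => (pvCanonA p0, p1, sp.1)) := by
            have hff2 : (pvRowsB fams).filter (fun r => r.1 == pvCanonA p0 && r.2.1 == p1)
                = ((pvRowsB fams).filter (fun r => r.1 == pvCanonA p0)).filter
                    (fun r => r.2.1 == p1) := by
              rw [List.filter_filter]
              exact List.filter_congr (fun r _ => Bool.and_comm _ _)
            rw [hff2, pv_filter_fam fams h1 (pvCanonA p0), hbp, Option.getD_some]
            obtain ⟨fp, hfp, -, hfp2⟩ := pv_getA_mem fams (pvCanonA p0) bp hbp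
            rw [pv_filter_plat (pvCanonA p0) p1 bp (hfp2 ▸ h2a fp hfp), hbs, Option.getD_some]
          have hff : (pvRowsB fams).filter
                (fun r => r.1 == pvCanonA p0 && r.2.1 == p1 && r.2.2 == PySem.Str.join "|" (p2 :: rest2))
              = (bs.map (fun sp => (pvCanonA p0, p1, sp.1))).filter
                  (fun r => r.2.2 == PySem.Str.join "|" (p2 :: rest2)) := by
            rw [← hfilter2, List.filter_filter]
            exact List.filter_congr (fun r _ => Bool.and_comm _ _)
          rw [hff]
          obtain ⟨fp, hfp, -, hfp2⟩ := pv_getA_mem fams (pvCanonA p0) bp hbp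
          obtain ⟨pp, hpp, -, hpp2⟩ := pv_getA_mem bp p1 bs hbs
          have h3 : (bs.map (·.1)).Nodup := hpp2 ▸ (h2 fp hfp).2 pp (hfp2 ▸ hpp)
          rw [pv_filter_ser (pvCanonA p0) p1 (PySem.Str.join "|" (p2 :: rest2)) bs h3,
              if_pos hsome]
          simp [PySem.Set.update, pvKey3]
        · rw [if_neg hc, if_neg hc]
          dsimp only
          simp only [Bool.and_true]
          rw [pv_addAll_some,
              pv_scan_eq_update (pvRowsB fams) (fun r => r.1 == pvCanonA p0 && r.2.1 == p1) out,
              pv_scan_pair fams h1 h2a]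

-- one loop iteration of A = one loop iteration of B
theorem pv_step_eq (fams : List (String × List (String × List (String × Int))))
    (h : Pre_migrate_selected_group_keys_py [] fams) (out : PySem.Set String) (key : String) :
    pvStepA fams out key
      = pvStepB (pvRowsB fams) (PySem.Set.ofList (pvRowsB fams)) out key := by
  unfold pvStepA pvStepB pvPatternB
  rw [show pvPartsB = pvPartsA from rfl]
  exact pv_dispatch_eq fams h out (pvPartsA key)

-- ===== VERDICT (by name: the statement is the Claim_ definition above) =====
theorem migrate_selected_group_keys_py_spec : Claim_equal_migrate_selected_group_keys_py := by
  intro selected fams _ hpre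
  unfold Spec_migrate_selected_group_keys_py migrate_selected_group_keys_py migrate_selected_group_keys_py_alt
  have hp : Pre_migrate_selected_group_keys_py [] fams := hpre
  exact PySem.List.foldl_congr_mem selected _ _ _ (fun acc x _ => pv_step_eq fams hp acc x)
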